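-- pv_equiv track=rewrite | github.com/Ashiq-am/Path-of-Python | 3.Data Types/Arrays Set 1 and Set 2/Prefix Sum/Minimise N such that sum of count of all factors upto N is greater than or equal to X/1.Minimise N such that sum of count of all factors upto N is greater than or equal to X.py | minN
-- ===== SOURCE A (Python) =====
-- def CountFactors(N):
--
-- 	cnt = 0
-- 	i = 1
-- 	while i * i <= N:
--
-- 		if (N % i == 0):
-- 			if (N // i == i):
-- 				cnt += 1
-- 			else:
-- 				cnt += 2
-- 		i += 1
--
-- 	# Return the count
-- 	return cnt
--
-- def minN(X):
--
-- 	i = 1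
-- 	total = 0
--
-- 	while (1):
--
-- 		# Add the count of total factor
-- 		# of i to variable total
-- 		total = total + CountFactors(i)
--
-- 		# If total count is greater than
-- 		# equal to N, then return i
-- 		if (total >= X):
-- 			return i
-- 		i += 1
-- ===== SOURCE B (Python) =====
-- def _D(n):
--     # divisor summatory function: D(n) = sum_{k=1}^{n} n // k
--     # = total number of divisors of all integers 1..n
--     s = 0
--     k = 1
--     while k <= n:
--         s += n // k
--         k += 1
--     return s
--
--
-- def minN(X):
--     # Binary search for the least N >= 1 with D(N) >= X.
--     # D is nondecreasing and D(max(X, 1)) >= X, so the answer lies in [1, max(X, 1)].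
--     lo, hi = 1, max(X, 1)
--     while lo < hi:
--         mid = (lo + hi) // 2
--         if _D(mid) >= X:
--             hi = mid
--         else:
--             lo = mid + 1
--     return lo
-- ===== Notes on version B (the rewrite author's own statement) =====
-- stated objective: faster
-- what changed: Instead of incrementing N and adding each CountFactors(N) computed by trial division up to sqrt(N), B binary-searches for the least N whose divisor summatory function D(N) = sum_{k<=N} N//k (a single O(N) pass, no per-integer sqrt loops) reaches X.
import Mathlib
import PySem

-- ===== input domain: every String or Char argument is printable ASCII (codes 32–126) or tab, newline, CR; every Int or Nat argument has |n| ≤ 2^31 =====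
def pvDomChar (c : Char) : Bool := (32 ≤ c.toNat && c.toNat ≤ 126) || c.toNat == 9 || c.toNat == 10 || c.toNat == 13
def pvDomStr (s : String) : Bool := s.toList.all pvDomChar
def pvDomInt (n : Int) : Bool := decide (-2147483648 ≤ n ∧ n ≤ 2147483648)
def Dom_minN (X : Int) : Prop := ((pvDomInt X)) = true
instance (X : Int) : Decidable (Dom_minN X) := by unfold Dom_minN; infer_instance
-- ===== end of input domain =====

-- B replaces A's linear scan (adding CountFactors(N) for each N) by a binary search on N
-- using the divisor summatory function D(N) = Σ_{k=1}^{N} N//k; objective: faster.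

-- ===== PORT A =====

-- used by cfLoop's decreasing_by: the loop guard i*i ≤ N forces i ≤ N
lemma le_of_sq_le (N i : Int) (hcond : i * i ≤ N) : i ≤ N := by
  rcases le_or_gt 1 i with h1 | h1
  · nlinarith
  · nlinarith [mul_self_nonneg i]

lemma cfLoop_dec (N i : Int) (h : i * i ≤ N) : (N + 1 - (i + 1)).toNat < (N + 1 - i).toNat := by
  have hiN : i ≤ N := le_of_sq_le N i h
  omega

-- while i * i <= N: ...  (body of Python CountFactors)
def cfLoop (N cnt i : Int) : Int :=
  if h : i * i ≤ N then
    cfLoop N (cnt + (if PySem.Int.mod N i = 0 then (if PySem.Int.floordiv N i = i then (1:Int) else 2) else 0)) (i + 1)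
  else cnt
termination_by (N + 1 - i).toNat
decreasing_by exact cfLoop_dec N i h

def CountFactors (N : Int) : Int := cfLoop N 0 1

-- the next three lemmas are cited by minNLoop's decreasing_by: each loop step adds
-- CountFactors(i) ≥ 1 to total once i ≥ 1 (and adds 0 while i ≤ 0)
lemma cfLoop_ge (k : Nat) : ∀ (N cnt i : Int), (N + 1 - i).toNat ≤ k → cnt ≤ cfLoop N cnt i := by
  induction k with
  | zero =>
    intro N cnt i hk
    rw [cfLoop, dif_neg]
    intro hcond
    exact absurd (le_of_sq_le N i hcond) (by omega)
  | succ k ih =>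
    intro N cnt i hk
    by_cases hcond : i * i ≤ N
    · rw [cfLoop, dif_pos hcond]
      refine le_trans ?_ (ih N _ (i + 1) (by have := le_of_sq_le N i hcond; omega))
      split_ifs <;> omega
    · rw [cfLoop, dif_neg hcond]

lemma CountFactors_one_le (i : Int) (hi : 1 ≤ i) : 1 ≤ CountFactors i := by
  rw [CountFactors, cfLoop, dif_pos (by nlinarith : (1:Int) * 1 ≤ i)]
  refine le_trans ?_ (cfLoop_ge (i - 1).toNat i _ 2 (by omega))
  simp only [PySem.Int.mod_eq_zero_iff_dvd, if_pos (one_dvd i)]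
  split_ifs <;> omega

lemma CountFactors_eq_zero (i : Int) (hi : i ≤ 0) : CountFactors i = 0 := by
  rw [CountFactors, cfLoop, dif_neg]
  rw [one_mul]
  omega

lemma minNLoop_dec (X total i : Int) (h : ¬ total + CountFactors i ≥ X) :
    (X - (total + CountFactors i)).toNat + (1 - (i + 1)).toNat
      < (X - total).toNat + (1 - i).toNat := by
  rcases le_or_gt 1 i with h1 | h1
  · have := CountFactors_one_le i h1
    omega
  · have := CountFactors_eq_zero i (by omega)
    omega

-- while (1): total = total + CountFactors(i); if total >= X: return i; i += 1
def minNLoop (X total i : Int) : Int :=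
  if h : total + CountFactors i ≥ X then i
  else minNLoop X (total + CountFactors i) (i + 1)
termination_by (X - total).toNat + (1 - i).toNat
decreasing_by exact minNLoop_dec X total i h

def minN (X : Int) : Int := minNLoop X 0 1

-- ===== PORT B =====

lemma dLoop_dec (n k : Int) (h : k ≤ n) : (n + 1 - (k + 1)).toNat < (n + 1 - k).toNat := by
  omega

-- _D(n): s = 0; k = 1; while k <= n: s += n // k; k += 1
def dLoop (n s k : Int) : Int :=
  if h : k ≤ n then dLoop n (s + PySem.Int.floordiv n k) (k + 1) else s
termination_by (n + 1 - k).toNat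
decreasing_by exact dLoop_dec n k h

def Dsum (n : Int) : Int := dLoop n 0 1

lemma bsLoop_dec_left (lo hi : Int) (h : lo < hi) :
    (PySem.Int.floordiv (lo + hi) 2 - lo).toNat < (hi - lo).toNat := by
  have h2 : PySem.Int.floordiv (lo + hi) 2 < hi :=
    (PySem.Int.floordiv_lt_iff_lt_mul (by norm_num)).mpr (by omega)
  omega

lemma bsLoop_dec_right (lo hi : Int) (h : lo < hi) :
    (hi - (PySem.Int.floordiv (lo + hi) 2 + 1)).toNat < (hi - lo).toNat := by
  have h1 := (PySem.Int.floordiv_two_mid_bounds (le_of_lt h)).1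
  omega

-- while lo < hi: mid = (lo + hi) // 2; if _D(mid) >= X: hi = mid else: lo = mid + 1
def bsLoop (X lo hi : Int) : Int :=
  if h : lo < hi then
    if Dsum (PySem.Int.floordiv (lo + hi) 2) ≥ X then bsLoop X lo (PySem.Int.floordiv (lo + hi) 2)
    else bsLoop X (PySem.Int.floordiv (lo + hi) 2 + 1) hi
  else lo
termination_by (hi - lo).toNat
decreasing_by
  · exact bsLoop_dec_left lo hi h
  · exact bsLoop_dec_right lo hi h

def minN_alt (X : Int) : Int := bsLoop X 1 (max X 1)

-- ===== PRECONDITION & SPEC =====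
-- ===== PRECONDITION & SPEC =====
def Spec_minN (X : Int) (out : Int) : Prop := out = minN_alt X
instance (X : Int) (out : Int) : Decidable (Spec_minN X out) := by unfold Spec_minN; infer_instance

-- ===== CLAIM (what is proved, stated in full; the proofs are below) =====
def Claim_equal_minN : Prop := ∀ (X : Int), Dom_minN X → Spec_minN X (minN X)

-- ===== LEMMAS AND PROOFS =====

-- dN n = number of divisors of n; SN n = Σ_{j ≤ n} dN j (what A accumulates);
-- TN n = Σ_{k ≤ n} n / k (what B's _D computes). Core identity: SN = TN.
def dN (n : ℕ) : ℕ := ((Finset.Icc 1 n).filter (· ∣ n)).card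
def SN (n : ℕ) : ℕ := ∑ j ∈ Finset.Icc 1 n, dN j
def TN (n : ℕ) : ℕ := ∑ k ∈ Finset.Icc 1 n, n / k

lemma Icc_eq_insert_left (a b : ℕ) (h : a ≤ b) : Finset.Icc a b = insert a (Finset.Icc (a + 1) b) := by
  ext x
  simp only [Finset.mem_Icc, Finset.mem_insert]
  omega

lemma Icc_eq_insert_right (a b : ℕ) (h : a ≤ b) : Finset.Icc a b = insert b (Finset.Icc a (b - 1)) := by
  ext x
  simp only [Finset.mem_Icc, Finset.mem_insert]
  omega

lemma TN_mono {n m : ℕ} (h : n ≤ m) : TN n ≤ TN m := by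
  calc TN n ≤ ∑ k ∈ Finset.Icc 1 n, m / k :=
        Finset.sum_le_sum (fun k _ => Nat.div_le_div_right h)
    _ ≤ TN m := Finset.sum_le_sum_of_subset (Finset.Icc_subset_Icc_right h)

lemma le_TN (n : ℕ) : n ≤ TN n := by
  calc n = ∑ _k ∈ Finset.Icc 1 n, 1 := by simp [Nat.card_Icc]
    _ ≤ TN n := Finset.sum_le_sum (fun k hk => by
        rw [Finset.mem_Icc] at hk
        exact (Nat.one_le_div_iff (by omega)).mpr hk.2)

lemma TN_succ (n : ℕ) : TN (n + 1) = TN n + dN (n + 1) := by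
  have h1 : TN (n + 1) = (∑ k ∈ Finset.Icc 1 n, (n + 1) / k) + (n + 1) / (n + 1) :=
    Finset.sum_Icc_succ_top (by omega) _
  have h2 : ∀ k ∈ Finset.Icc 1 n, (n + 1) / k = n / k + if k ∣ n + 1 then 1 else 0 :=
    fun k _ => Nat.succ_div
  have h3 : (∑ k ∈ Finset.Icc 1 n, (n + 1) / k)
      = TN n + ((Finset.Icc 1 n).filter (· ∣ n + 1)).card := by
    rw [Finset.sum_congr rfl h2, Finset.sum_add_distrib, Finset.sum_boole]
    simp [TN]
  have h4 : dN (n + 1) = ((Finset.Icc 1 n).filter (· ∣ n + 1)).card + 1 := by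
    unfold dN
    rw [Icc_eq_insert_right 1 (n + 1) (by omega), show (n + 1) - 1 = n from rfl,
      Finset.filter_insert, if_pos (dvd_refl (n + 1)), Finset.card_insert_of_notMem]
    intro hmem
    have hm := (Finset.mem_filter.mp hmem).1
    rw [Finset.mem_Icc] at hm
    omega
  rw [h1, h3, Nat.div_self (by omega), h4]
  omega

lemma SN_zero : SN 0 = 0 := by simp [SN]

lemma SN_succ (n : ℕ) : SN (n + 1) = SN n + dN (n + 1) := Finset.sum_Icc_succ_top (by omega) _

lemma SN_eq_TN (n : ℕ) : SN n = TN n := by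
  induction n with
  | zero => simp [SN, TN]
  | succ n ih => rw [SN_succ, TN_succ, ih]

-- ----- characterization of A's CountFactors loop -----
def RemN (n i : ℕ) : Finset ℕ := (Finset.Icc 1 n).filter (fun d => d ∣ n ∧ i ≤ d ∧ d * i ≤ n)

lemma rem_subset (n i : ℕ) : RemN n (i + 1) ⊆ RemN n i := by
  intro d hd
  simp only [RemN, Finset.mem_filter, Finset.mem_Icc] at *
  obtain ⟨hic, hdvd, hle, hmul⟩ := hd
  exact ⟨hic, hdvd, by omega, le_trans (Nat.mul_le_mul_left d (by omega)) hmul⟩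

lemma rem_empty (n i : ℕ) (h : ¬ i * i ≤ n) : RemN n i = ∅ := by
  rw [Finset.eq_empty_iff_forall_notMem]
  intro d hd
  simp only [RemN, Finset.mem_filter, Finset.mem_Icc] at hd
  exact h (le_trans (Nat.mul_le_mul_right i hd.2.2.1) hd.2.2.2)

lemma rem_step_mem (n i : ℕ) (hi : 0 < i) (d : ℕ) (hd : d ∈ RemN n i) (hne : d ≠ i) :
    d ∈ RemN n (i + 1) ∨ (i ∣ n ∧ d = n / i) := by
  simp only [RemN, Finset.mem_filter, Finset.mem_Icc] at hd ⊢
  obtain ⟨hic, hdvd, hle, hmul⟩ := hd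
  have hd0 : 0 < d := by omega
  by_cases hc : d * (i + 1) ≤ n
  · exact Or.inl ⟨hic, hdvd, by omega, hc⟩
  · right
    obtain ⟨e, he⟩ := hdvd
    have h1 : d * i ≤ d * e := by rw [← he]; exact hmul
    have h2 : d * e < d * (i + 1) := by rw [← he]; omega
    have hie : i ≤ e := Nat.le_of_mul_le_mul_left h1 hd0
    have hei : e < i + 1 := Nat.lt_of_mul_lt_mul_left h2
    have hei' : e = i := by omega
    have hdvd2 : i ∣ n := ⟨d, by rw [he, hei', mul_comm]⟩
    have h6 : n / i * i = n := Nat.div_mul_cancel hdvd2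
    exact ⟨hdvd2, mul_right_cancel₀ (by omega : i ≠ 0)
      (show d * i = n / i * i by rw [h6, he, hei'])⟩

lemma rem_card_step (n i : ℕ) (hi : 1 ≤ i) (hii : i * i ≤ n) :
    (RemN n i).card = (if i ∣ n then (if n / i = i then 1 else 2) else 0) + (RemN n (i + 1)).card := by
  have hi0 : 0 < i := hi
  have hnotmem_i : i ∉ RemN n (i + 1) := by
    intro hmem
    simp only [RemN, Finset.mem_filter, Finset.mem_Icc] at hmem
    omega
  by_cases hdv : i ∣ n
  · have hqi : i * (n / i) = n := Nat.mul_div_cancel' hdv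
    have hiq : i ≤ n / i := Nat.le_of_mul_le_mul_left (by rw [hqi]; exact hii) hi0
    have himem : i ∈ RemN n i := by
      simp only [RemN, Finset.mem_filter, Finset.mem_Icc]
      exact ⟨⟨hi, le_trans (by nlinarith) hii⟩, hdv, le_refl i, hii⟩
    by_cases hqeq : n / i = i
    · have hset : RemN n i = insert i (RemN n (i + 1)) := by
        apply Finset.Subset.antisymm
        · intro d hd
          rw [Finset.mem_insert]
          by_cases hdi : d = i
          · exact Or.inl hdi
          · rcases rem_step_mem n i hi0 d hd hdi with hm | ⟨_, hdq⟩
            · exact Or.inr hm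
            · exact Or.inl (by rw [hdq, hqeq])
        · intro d hd
          rcases Finset.mem_insert.mp hd with hdi | hm
          · exact hdi ▸ himem
          · exact rem_subset n i hm
      rw [hset, Finset.card_insert_of_notMem hnotmem_i, if_pos hdv, if_pos hqeq]
      omega
    · have hq1 : i + 1 ≤ n / i := by omega
      have hqmem : n / i ∈ RemN n i := by
        simp only [RemN, Finset.mem_filter, Finset.mem_Icc]
        exact ⟨⟨by omega, Nat.div_le_self n i⟩, ⟨i, (Nat.div_mul_cancel hdv).symm⟩, hiq,
          le_of_eq (Nat.div_mul_cancel hdv)⟩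
      have hqnotmem : n / i ∉ RemN n (i + 1) := by
        intro hmem
        simp only [RemN, Finset.mem_filter, Finset.mem_Icc] at hmem
        have : n / i * (i + 1) = n + n / i := by
          rw [Nat.mul_succ, mul_comm (n / i) i, hqi]
        omega
      have hset : RemN n i = insert i (insert (n / i) (RemN n (i + 1))) := by
        apply Finset.Subset.antisymm
        · intro d hd
          rw [Finset.mem_insert, Finset.mem_insert]
          by_cases hdi : d = i
          · exact Or.inl hdi
          · rcases rem_step_mem n i hi0 d hd hdi with hm | ⟨_, hdq⟩
            · exact Or.inr (Or.inr hm)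
            · exact Or.inr (Or.inl hdq)
        · intro d hd
          rcases Finset.mem_insert.mp hd with hdi | hd2
          · exact hdi ▸ himem
          · rcases Finset.mem_insert.mp hd2 with hdq | hm
            · exact hdq ▸ hqmem
            · exact rem_subset n i hm
      rw [hset, Finset.card_insert_of_notMem, Finset.card_insert_of_notMem hqnotmem,
        if_pos hdv, if_neg hqeq]
      · omega
      · intro hmem
        rcases Finset.mem_insert.mp hmem with hcase | hcase
        · omega
        · exact hnotmem_i hcase
  · have hset : RemN n i = RemN n (i + 1) := by
      apply Finset.Subset.antisymm
      · intro d hd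
        have hdi : d ≠ i := by
          intro h
          subst h
          simp only [RemN, Finset.mem_filter, Finset.mem_Icc] at hd
          exact hdv hd.2.1
        rcases rem_step_mem n i hi0 d hd hdi with hm | ⟨hc, _⟩
        · exact hm
        · exact absurd hc hdv
      · exact rem_subset n i
    rw [hset, if_neg hdv]
    omega

lemma cfLoop_char (k : ℕ) : ∀ (n i : ℕ) (cnt : Int), 1 ≤ i → n + 1 - i ≤ k →
    cfLoop (n : Int) cnt (i : Int) = cnt + ((RemN n i).card : Int) := by
  induction k with
  | zero =>
    intro n i cnt hi hk
    have hii : ¬ i * i ≤ n := by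
      intro h
      have : i ≤ i * i := by nlinarith
      omega
    rw [cfLoop, dif_neg (by exact_mod_cast hii), rem_empty n i hii]
    simp
  | succ k ih =>
    intro n i cnt hi hk
    by_cases hii : i * i ≤ n
    · have hin : i ≤ n := le_trans (by nlinarith) hii
      rw [cfLoop, dif_pos (by exact_mod_cast hii : (i : Int) * i ≤ n)]
      rw [show ((i : Int) + 1) = ((i + 1 : ℕ) : Int) by push_cast; ring]
      rw [ih n (i + 1) _ (by omega) (by omega)]
      rw [rem_card_step n i hi hii]
      simp only [PySem.Int.mod_natCast, PySem.Int.floordiv_natCast, Nat.cast_eq_zero, Nat.cast_inj]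
      by_cases hm : i ∣ n
      · rw [if_pos (Nat.dvd_iff_mod_eq_zero.mp hm), if_pos hm]
        by_cases hdq : n / i = i
        · rw [if_pos hdq, if_pos hdq]; push_cast; ring
        · rw [if_neg hdq, if_neg hdq]; push_cast; ring
      · rw [if_neg (fun h => hm (Nat.dvd_iff_mod_eq_zero.mpr h)), if_neg hm]
        push_cast; ring
    · rw [cfLoop, dif_neg (by exact_mod_cast hii : ¬ (i : Int) * i ≤ n), rem_empty n i hii]
      simp

lemma CountFactors_char (n : ℕ) : CountFactors (n : Int) = (dN n : Int) := by
  rw [CountFactors, show (1 : Int) = ((1 : ℕ) : Int) by norm_num,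
    cfLoop_char n n 1 0 (le_refl 1) (by omega)]
  have hrem : RemN n 1 = (Finset.Icc 1 n).filter (· ∣ n) := by
    apply Finset.filter_congr
    intro d hd
    rw [Finset.mem_Icc] at hd
    simp [mul_one, hd.1, hd.2]
  rw [hrem]
  simp [dN]

-- ----- the common answer: least m ≥ 1 with X ≤ SN m -----
lemma exists_hit (X : Int) : ∃ m : ℕ, 1 ≤ m ∧ X ≤ (SN m : Int) := by
  refine ⟨max X.toNat 1, le_max_right _ _, ?_⟩
  have h1 : (X.toNat : Int) ≤ (max X.toNat 1 : ℕ) := by exact_mod_cast Nat.le_max_left _ _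
  have h2 : ((max X.toNat 1 : ℕ) : Int) ≤ (SN (max X.toNat 1) : Int) := by
    rw [SN_eq_TN]; exact_mod_cast le_TN _
  have h3 := Int.self_le_toNat X
  omega

def ansN (X : Int) : ℕ := Nat.find (exists_hit X)

lemma ans_pos (X : Int) : 1 ≤ ansN X := (Nat.find_spec (exists_hit X)).1

lemma ans_hit (X : Int) : X ≤ (SN (ansN X) : Int) := (Nat.find_spec (exists_hit X)).2

lemma ans_min (X : Int) (m : ℕ) (h1 : 1 ≤ m) (h2 : X ≤ (SN m : Int)) : ansN X ≤ m :=
  Nat.find_min' (exists_hit X) ⟨h1, h2⟩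

-- ----- A's main loop returns ansN -----
lemma minNLoop_char (X : Int) (k : ℕ) : ∀ (I : ℕ) (total : Int), total = (SN I : Int) →
    I < ansN X → ansN X ≤ I + 1 + k → minNLoop X total ((I : Int) + 1) = ((ansN X : ℕ) : Int) := by
  induction k with
  | zero =>
    intro I total htot hlt hle
    have hans : ansN X = I + 1 := by omega
    have hcf : CountFactors ((I : Int) + 1) = (dN (I + 1) : Int) := by
      rw [show ((I : Int) + 1) = ((I + 1 : ℕ) : Int) by push_cast; ring]
      exact CountFactors_char (I + 1)
    have hX : X ≤ (SN (I + 1) : Int) := by rw [← hans]; exact ans_hit X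
    rw [minNLoop, dif_pos (by rw [hcf, htot, ← Nat.cast_add, ← SN_succ]; exact hX)]
    rw [hans]; push_cast; ring
  | succ k ih =>
    intro I total htot hlt hle
    have hcf : CountFactors ((I : Int) + 1) = (dN (I + 1) : Int) := by
      rw [show ((I : Int) + 1) = ((I + 1 : ℕ) : Int) by push_cast; ring]
      exact CountFactors_char (I + 1)
    have htot' : total + CountFactors ((I : Int) + 1) = (SN (I + 1) : Int) := by
      rw [hcf, htot, ← Nat.cast_add, ← SN_succ]
    rw [minNLoop]
    by_cases hge : total + CountFactors ((I : Int) + 1) ≥ X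
    · rw [dif_pos hge]
      have h1 : ansN X ≤ I + 1 := ans_min X (I + 1) (by omega) (by rw [← htot']; exact hge)
      have hans : ansN X = I + 1 := by omega
      rw [hans]; push_cast; ring
    · rw [dif_neg hge]
      have hne : ansN X ≠ I + 1 := by
        intro h
        exact hge (by rw [htot', ← h]; exact ans_hit X)
      rw [show ((I : Int) + 1 + 1) = ((I + 1 : ℕ) : Int) + 1 by push_cast; ring]
      exact ih (I + 1) _ htot' (by omega) (by omega)

lemma minN_eq_ans (X : Int) : minN X = ((ansN X : ℕ) : Int) := by
  rw [minN, show (1 : Int) = ((0 : ℕ) : Int) + 1 by norm_num]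
  exact minNLoop_char X (ansN X) 0 0 (by rw [SN_zero]; norm_num)
    (by have := ans_pos X; omega) (by omega)

-- ----- B's _D computes TN -----
lemma dLoop_char (k : ℕ) : ∀ (n j : ℕ) (s : Int), 1 ≤ j → n + 1 - j ≤ k →
    dLoop (n : Int) s (j : Int) = s + ((∑ t ∈ Finset.Icc j n, n / t : ℕ) : Int) := by
  induction k with
  | zero =>
    intro n j s hj hk
    rw [dLoop, dif_neg (by exact_mod_cast (by omega : ¬ j ≤ n)), Finset.Icc_eq_empty (by omega)]
    simp
  | succ k ih =>
    intro n j s hj hk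
    by_cases hjn : j ≤ n
    · rw [dLoop, dif_pos (by exact_mod_cast hjn : (j : Int) ≤ n)]
      rw [show ((j : Int) + 1) = ((j + 1 : ℕ) : Int) by push_cast; ring]
      rw [PySem.Int.floordiv_natCast]
      rw [ih n (j + 1) _ (by omega) (by omega)]
      rw [Icc_eq_insert_left j n hjn, Finset.sum_insert (by rw [Finset.mem_Icc]; omega)]
      push_cast; ring
    · rw [dLoop, dif_neg (by exact_mod_cast hjn : ¬ (j : Int) ≤ n), Finset.Icc_eq_empty (by omega)]
      simp

lemma Dsum_char (n : ℕ) : Dsum (n : Int) = (TN n : Int) := by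
  rw [Dsum, show (1 : Int) = ((1 : ℕ) : Int) by norm_num, dLoop_char n n 1 0 (le_refl 1) (by omega)]
  simp [TN]

-- ----- B's binary search returns ansN -----
lemma bsLoop_char (X : Int) (k : ℕ) : ∀ (lo hi : Int), (hi - lo).toNat ≤ k → 1 ≤ lo →
    lo ≤ ((ansN X : ℕ) : Int) → ((ansN X : ℕ) : Int) ≤ hi → bsLoop X lo hi = ((ansN X : ℕ) : Int) := by
  induction k with
  | zero =>
    intro lo hi hk h1 hlo hhi
    rw [bsLoop, dif_neg (by omega)]
    omega
  | succ k ih =>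
    intro lo hi hk h1 hlo hhi
    by_cases hlt : lo < hi
    · rw [bsLoop, dif_pos hlt]
      obtain ⟨hml, hmh⟩ := PySem.Int.floordiv_two_mid_bounds (le_of_lt hlt)
      have hmlt : PySem.Int.floordiv (lo + hi) 2 < hi :=
        (PySem.Int.floordiv_lt_iff_lt_mul (by norm_num)).mpr (by omega)
      have hmn : PySem.Int.floordiv (lo + hi) 2 = (((PySem.Int.floordiv (lo + hi) 2).toNat : ℕ) : Int) :=
        (Int.toNat_of_nonneg (by omega)).symm
      have hD : Dsum (PySem.Int.floordiv (lo + hi) 2)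
          = (TN (PySem.Int.floordiv (lo + hi) 2).toNat : Int) := by
        rw [hmn]; exact Dsum_char _
      by_cases hc : Dsum (PySem.Int.floordiv (lo + hi) 2) ≥ X
      · rw [if_pos hc]
        have hans : ((ansN X : ℕ) : Int) ≤ PySem.Int.floordiv (lo + hi) 2 := by
          have h2 : X ≤ (SN (PySem.Int.floordiv (lo + hi) 2).toNat : Int) := by
            rw [SN_eq_TN, ← hD]; exact hc
          have h3 := ans_min X _ (by omega) h2
          omega
        exact ih lo _ (by omega) h1 hlo hans
      · rw [if_neg hc]
        have hans : PySem.Int.floordiv (lo + hi) 2 + 1 ≤ ((ansN X : ℕ) : Int) := by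
          by_contra hcon
          have h2 : ansN X ≤ (PySem.Int.floordiv (lo + hi) 2).toNat := by omega
          have h3 : (SN (ansN X) : Int) ≤ (TN (PySem.Int.floordiv (lo + hi) 2).toNat : Int) := by
            rw [SN_eq_TN]; exact_mod_cast TN_mono h2
          have h4 := ans_hit X
          rw [← hD] at h3
          omega
        exact ih _ hi (by omega) (by omega) hans hhi
    · rw [bsLoop, dif_neg hlt]
      omega

lemma minN_alt_eq_ans (X : Int) : minN_alt X = ((ansN X : ℕ) : Int) := by
  have hM0 : (0 : Int) ≤ max X 1 := by
    have := le_max_right X 1; omega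
  have hMc : (((max X 1).toNat : ℕ) : Int) = max X 1 := Int.toNat_of_nonneg hM0
  have hX : X ≤ (SN (max X 1).toNat : Int) := by
    rw [SN_eq_TN]
    have h1 : ((max X 1).toNat : Int) ≤ (TN (max X 1).toNat : Int) := by exact_mod_cast le_TN _
    have := le_max_left X 1
    omega
  have hans : ((ansN X : ℕ) : Int) ≤ max X 1 := by
    have h1 : ansN X ≤ (max X 1).toNat := by
      refine ans_min X _ ?_ hX
      have := le_max_right X 1
      omega
    omega
  rw [minN_alt]
  exact bsLoop_char X (max X 1 - 1).toNat 1 (max X 1) (by omega) (le_refl 1)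
    (by have := ans_pos X; omega) hans

-- ===== VERDICT (by name: the statement is the Claim_ definition above) =====
theorem minN_spec : Claim_equal_minN := by
  intro X _
  unfold Spec_minN
  rw [minN_eq_ans, minN_alt_eq_ans]
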